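-- pv_equiv track=rewrite | github.com/CenturyHSProgramming/single-webpage-project | webanalyst/CSSReport.py | get_required_headers_results
-- ===== SOURCE A (Python) =====
-- def get_required_headers_results(required, data, pages):
--     results = ""
--     # were all required headers present on each page?
--     for page in pages:
--         # get a copy of required headers
--         target_headers = required[:]
--
--         for item in data:
--             item.get("html_file")
--
--             # remove any header selector from copy of required
--             if item.get("html_file") == page:
--                 selector = item.get("selector")
--
--                 if selector in target_headers:
--                     target_headers.remove(selector)
--
--                 if not target_headers:
--                     break
--
--         # check to see if all header selectors have been applied
--         if target_headers:
--             for header_selector in target_headers: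
--                 results += "<li>In " + page + ": "
--                 results += header_selector + " was not applied.</li>\n"
--
--     # If we have results, it's a fail
--     if results:
--         result = "Fail: not all required heading selectors are present"
--         results = result + "\n<ul>" + results + "</ul>\n"
--
--     return results
-- ===== SOURCE B (Python) =====
-- def get_required_headers_results(required, data, pages):
--     # Group all selectors by page once, then subtract per page with a counter.
--     selectors_by_page = {}
--     for item in data:
--         selectors_by_page.setdefault(item.get("html_file"), []).append(item.get("selector"))
--     results = ""
--     for page in pages:
--         counts = {}
--         for s in selectors_by_page.get(page, []):
--             counts[s] = counts.get(s, 0) + 1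
--         for h in required:
--             if counts.get(h, 0) > 0:
--                 counts[h] = counts.get(h, 0) - 1
--             else:
--                 results += "<li>In " + page + ": " + h + " was not applied.</li>\n"
--     if results:
--         results = "Fail: not all required heading selectors are present\n<ul>" + results + "</ul>\n"
--     return results
-- ===== Notes on version B (the rewrite author's own statement) =====
-- stated objective: alternative
-- what changed: Instead of rescanning all data for every page and repeatedly calling list.remove on a copy of required, B groups the selectors by html_file into a dict in one pass and then, per page, subtracts a selector counter from required in order.
import Mathlib
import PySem

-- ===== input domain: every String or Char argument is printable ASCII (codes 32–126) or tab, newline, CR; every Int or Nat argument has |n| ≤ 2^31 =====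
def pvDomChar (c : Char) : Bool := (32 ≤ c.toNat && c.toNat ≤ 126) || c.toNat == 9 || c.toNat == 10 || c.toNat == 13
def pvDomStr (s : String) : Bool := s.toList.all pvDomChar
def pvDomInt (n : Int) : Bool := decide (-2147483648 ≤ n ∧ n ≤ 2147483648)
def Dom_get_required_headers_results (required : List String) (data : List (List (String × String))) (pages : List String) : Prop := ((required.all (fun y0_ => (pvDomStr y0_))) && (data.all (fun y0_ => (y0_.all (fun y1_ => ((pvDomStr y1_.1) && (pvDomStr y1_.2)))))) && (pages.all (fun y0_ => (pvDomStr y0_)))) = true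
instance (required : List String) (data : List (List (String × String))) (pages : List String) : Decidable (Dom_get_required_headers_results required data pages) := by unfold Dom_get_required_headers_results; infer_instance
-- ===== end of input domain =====

-- B groups data's selectors by html_file into a dict once and, per page, subtracts a selector counter from `required`,
-- instead of A's per-page rescan of all data with repeated list.remove (objective: alternative algorithm, same cost).


-- ===== PORT A =====
-- item.get(k) on a Python dict passed as an association list (first match)
def pvItemGet (item : List (String × String)) (k : String) : Option String :=
  (PySem.Dict.mk item).get? k

-- body of A's inner-loop removal: `if selector in target_headers: target_headers.remove(selector)`
-- (list.remove under the membership guard is List.erase, per PySem.List.remove?_eq_some_erase)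
def pvStep (t : List String) (s : Option String) : List String :=
  match s with
  | some v => if v ∈ t then t.erase v else t
  | none => t

-- A's inner `for item in data` loop, with the `if not target_headers: break`
def pvAinner (page : String) (target : List String) : List (List (String × String)) → List String
  | [] => target
  | item :: rest =>
    if pvItemGet item "html_file" == some page then
      let target' := pvStep target (pvItemGet item "selector")
      if target'.isEmpty then target' else pvAinner page target' rest
    else pvAinner page target rest

def get_required_headers_results (required : List String) (data : List (List (String × String))) (pages : List String) : String :=
  let results := pages.foldl (fun results page =>
    let target := pvAinner page required data
    if target.isEmpty then results
    else target.foldl (fun r h =>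
      (r ++ (("<li>In " ++ page) ++ ": ")) ++ (h ++ " was not applied.</li>\n")) results) ""
  if results == "" then results
  else (("Fail: not all required heading selectors are present" ++ "\n<ul>") ++ results) ++ "</ul>\n"

-- ===== PORT B =====
def get_required_headers_results_alt (required : List String) (data : List (List (String × String))) (pages : List String) : String :=
  let byPage : PySem.Dict (Option String) (List (Option String)) :=
    data.foldl (fun d item =>
      d.modify (pvItemGet item "html_file") [] (· ++ [pvItemGet item "selector"])) PySem.Dict.empty
  let results := pages.foldl (fun results page =>
    let counts : PySem.Dict (Option String) Int :=
      (byPage.getD (some page) []).foldl (fun d s => d.insert s (d.getD s 0 + 1)) PySem.Dict.empty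
    (required.foldl (fun (st : PySem.Dict (Option String) Int × String) h =>
        if 0 < st.1.getD (some h) 0 then
          (st.1.insert (some h) (st.1.getD (some h) 0 - 1), st.2)
        else
          (st.1, st.2 ++ (((("<li>In " ++ page) ++ ": ") ++ h) ++ " was not applied.</li>\n")))
      (counts, results)).2) ""
  if results == "" then results
  else ("Fail: not all required heading selectors are present\n<ul>" ++ results) ++ "</ul>\n"

-- ===== PRECONDITION & SPEC =====
def Spec_get_required_headers_results (required : List String) (data : List (List (String × String))) (pages : List String) (out : String) : Prop := out = get_required_headers_results_alt required data pages
instance (required : List String) (data : List (List (String × String))) (pages : List String) (out : String) : Decidable (Spec_get_required_headers_results required data pages out) := by unfold Spec_get_required_headers_results; infer_instance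

-- ===== CLAIM (what is proved, stated in full; the proofs are below) =====
def Claim_equal_get_required_headers_results : Prop := ∀ (required : List String) (data : List (List (String × String))) (pages : List String), Dom_get_required_headers_results required data pages → Spec_get_required_headers_results required data pages (get_required_headers_results required data pages)

-- ===== LEMMAS AND PROOFS =====

-- the selectors of the data items belonging to `page`, in data order
def pvSels (data : List (List (String × String))) (page : String) : List (Option String) :=
  (data.filter (fun item => pvItemGet item "html_file" == some page)).map
    (fun item => pvItemGet item "selector")

-- canonical "subtract a multiset (given as counts) from `required`, keeping order"
def pvKeep : (String → Nat) → List String → List String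
  | _, [] => []
  | c, h :: t => if 0 < c h then pvKeep (fun x => if x = h then c x - 1 else c x) t else h :: pvKeep c t

theorem pvKeep_cons_pos (c : String → Nat) (h : String) (t : List String) (hp : 0 < c h) :
    pvKeep c (h :: t) = pvKeep (fun x => if x = h then c x - 1 else c x) t := by
  simp [pvKeep, hp]

theorem pvKeep_cons_zero (c : String → Nat) (h : String) (t : List String) (hz : c h = 0) :
    pvKeep c (h :: t) = h :: pvKeep c t := by
  simp [pvKeep, hz]

theorem pvKeep_zero (t : List String) (c : String → Nat) (hc : ∀ h, c h = 0) : pvKeep c t = t := by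
  induction t generalizing c with
  | nil => rfl
  | cons h t ih => simp [pvKeep, hc h, ih _ hc]

theorem pvKeep_bump (t : List String) (c : String → Nat) (v : String) :
    pvKeep (fun x => if x = v then c x + 1 else c x) t = pvKeep c (pvStep t (some v)) := by
  induction t generalizing c with
  | nil => simp [pvKeep, pvStep]
  | cons h t ih =>
    by_cases hv : h = v
    · subst hv
      have hstep : pvStep (h :: t) (some h) = t := by simp [pvStep]
      rw [hstep, pvKeep_cons_pos _ _ _ (by simp)]
      have e1 : (fun x => if x = h then (if x = h then c x + 1 else c x) - 1 else (if x = h then c x + 1 else c x)) = c := by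
        funext x; by_cases hx : x = h <;> simp [hx]
      rw [e1]
    · have hstep : pvStep (h :: t) (some v) = h :: pvStep t (some v) := by
        by_cases hm : v ∈ t <;> simp [pvStep, List.erase_cons, hm, hv]
      rw [hstep]
      by_cases hc : 0 < c h
      · rw [pvKeep_cons_pos _ _ _ (by simpa [hv] using hc), pvKeep_cons_pos _ _ _ hc]
        have e2 : (fun x => if x = h then (if x = v then c x + 1 else c x) - 1 else (if x = v then c x + 1 else c x))
            = (fun x => if x = v then (if x = h then c x - 1 else c x) + 1 else (if x = h then c x - 1 else c x)) := by
          funext x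
          by_cases hx : x = h
          · simp [hx, hv]
          · by_cases hx' : x = v <;> simp [hx, hx', Ne.symm hv]
        rw [e2, ih]
      · have hz : c h = 0 := by omega
        rw [pvKeep_cons_zero _ _ _ (by simp [hv, hz]), pvKeep_cons_zero _ _ _ hz, ih]

theorem pvStep_nil (s : Option String) : pvStep [] s = [] := by
  cases s <;> simp [pvStep]

theorem pvFoldStep_nil (l : List (Option String)) : l.foldl pvStep [] = [] := by
  induction l with
  | nil => rfl
  | cons s rest ih => simpa [pvStep_nil] using ih

theorem pvFoldStep_eq_keep (sl : List (Option String)) (t : List String) :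
    sl.foldl pvStep t = pvKeep (fun h => sl.count (some h)) t := by
  induction sl generalizing t with
  | nil => simp [pvKeep_zero]
  | cons s rest ih =>
    rw [List.foldl_cons, ih]
    cases s with
    | none =>
      have : pvStep t none = t := rfl
      rw [this]
      have e : (fun h => (none :: rest).count (some h)) = (fun h => rest.count (some h)) := by
        funext h; simp [List.count_cons]
      rw [e]
    | some v =>
      have e : (fun h => ((some v :: rest).count (some h) : Nat))
          = (fun x => if x = v then rest.count (some x) + 1 else rest.count (some x)) := by
        funext h
        by_cases hv : h = v
        · subst hv; simp [List.count_cons]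
        · simp [List.count_cons, hv, (show ¬ v = h from fun e => hv e.symm)]
      rw [e, pvKeep_bump]

theorem pvAinner_eq_foldl (page : String) (data : List (List (String × String))) (t : List String) :
    pvAinner page t data = (pvSels data page).foldl pvStep t := by
  induction data generalizing t with
  | nil => rfl
  | cons item rest ih =>
    by_cases hp : pvItemGet item "html_file" == some page
    · have hsels : pvSels (item :: rest) page = pvItemGet item "selector" :: pvSels rest page := by
        simp [pvSels, List.filter_cons, hp]
      rw [hsels, List.foldl_cons]
      by_cases he : (pvStep t (pvItemGet item "selector")).isEmpty
      · have : pvStep t (pvItemGet item "selector") = [] := by simpa using he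
        simp [pvAinner, hp, he, this, pvFoldStep_nil]
      · simp [pvAinner, hp, he, ih]
    · have hsels : pvSels (item :: rest) page = pvSels rest page := by
        simp [pvSels, List.filter_cons, hp]
      simp [pvAinner, hp, hsels, ih]

theorem pvGroup_getD (data : List (List (String × String))) (page : String) :
    ((data.foldl (fun d item =>
        d.modify (pvItemGet item "html_file") [] (· ++ [pvItemGet item "selector"]))
        (PySem.Dict.empty : PySem.Dict (Option String) (List (Option String)))).getD (some page) [])
      = pvSels data page := by
  have h1 : data.foldl (fun d item =>
        d.modify (pvItemGet item "html_file") [] (· ++ [pvItemGet item "selector"]))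
        (PySem.Dict.empty : PySem.Dict (Option String) (List (Option String)))
      = (data.map (fun item => (pvItemGet item "html_file", pvItemGet item "selector"))).foldl
          (fun d p => d.modify p.1 [] (· ++ [p.2])) PySem.Dict.empty := by
    rw [List.foldl_map]
  rw [h1, PySem.Dict.getD_foldl_modify_append]
  simp [pvSels, List.filter_map, List.map_map, Function.comp_def]

theorem pvBfold_eq (page : String) (t : List String) (d : PySem.Dict (Option String) Int) (r : String)
    (hd : ∀ h : String, 0 ≤ d.getD (some h) 0) :
    (t.foldl (fun (st : PySem.Dict (Option String) Int × String) h =>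
        if 0 < st.1.getD (some h) 0 then
          (st.1.insert (some h) (st.1.getD (some h) 0 - 1), st.2)
        else
          (st.1, st.2 ++ (((("<li>In " ++ page) ++ ": ") ++ h) ++ " was not applied.</li>\n")))
      (d, r)).2
      = (pvKeep (fun h => (d.getD (some h) 0).toNat) t).foldl (fun r h =>
          (r ++ (("<li>In " ++ page) ++ ": ")) ++ (h ++ " was not applied.</li>\n")) r := by
  induction t generalizing d r with
  | nil => rfl
  | cons h t ih =>
    rw [List.foldl_cons]
    dsimp only
    by_cases hc : 0 < d.getD (some h) 0
    · rw [if_pos hc]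
      rw [ih _ _ (by
        intro h'
        by_cases hh : (some h' : Option String) = some h
        · rw [PySem.Dict.getD_insert, if_pos hh]; omega
        · rw [PySem.Dict.getD_insert, if_neg hh]; exact hd h')]
      rw [pvKeep_cons_pos _ _ _ (by omega)]
      have e : (fun h' => (((d.insert (some h) (d.getD (some h) 0 - 1)).getD (some h') 0)).toNat)
          = (fun x => if x = h then (d.getD (some x) 0).toNat - 1 else (d.getD (some x) 0).toNat) := by
        funext x
        by_cases hx : x = h
        · subst hx; rw [PySem.Dict.getD_insert, if_pos rfl]; simp
        · rw [PySem.Dict.getD_insert, if_neg (by simpa using hx)]; simp [hx]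
      rw [e]
    · rw [if_neg hc]
      have hz : (d.getD (some h) 0).toNat = 0 := by have := hd h; omega
      rw [ih _ _ hd, pvKeep_cons_zero _ _ _ hz, List.foldl_cons]
      have e : r ++ (((("<li>In " ++ page) ++ ": ") ++ h) ++ " was not applied.</li>\n")
          = (r ++ (("<li>In " ++ page) ++ ": ")) ++ (h ++ " was not applied.</li>\n") := by
        simp [String.append_assoc]
      rw [e]

theorem pvPage_eq (required : List String) (data : List (List (String × String)))
    (results page : String) :
    (let counts : PySem.Dict (Option String) Int :=
      ((data.foldl (fun d item =>
          d.modify (pvItemGet item "html_file") [] (· ++ [pvItemGet item "selector"]))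
          (PySem.Dict.empty : PySem.Dict (Option String) (List (Option String)))).getD (some page) []).foldl
        (fun d s => d.insert s (d.getD s 0 + 1)) PySem.Dict.empty
     (required.foldl (fun (st : PySem.Dict (Option String) Int × String) h =>
        if 0 < st.1.getD (some h) 0 then
          (st.1.insert (some h) (st.1.getD (some h) 0 - 1), st.2)
        else
          (st.1, st.2 ++ (((("<li>In " ++ page) ++ ": ") ++ h) ++ " was not applied.</li>\n")))
      (counts, results)).2)
    = (let target := pvAinner page required data
       if target.isEmpty then results
       else target.foldl (fun r h =>
         (r ++ (("<li>In " ++ page) ++ ": ")) ++ (h ++ " was not applied.</li>\n")) results) := by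
  dsimp only
  rw [pvGroup_getD]
  have hcnt : ∀ v : Option String,
      ((pvSels data page).foldl (fun d s => d.insert s (d.getD s 0 + 1))
        (PySem.Dict.empty : PySem.Dict (Option String) Int)).getD v 0 = ((pvSels data page).count v : Int) := by
    intro v
    rw [PySem.Dict.getD_foldl_insert_add_one]
    simp
  rw [pvBfold_eq _ _ _ _ (by intro h; rw [hcnt]; positivity)]
  have e : (fun h => ((((pvSels data page).foldl (fun d s => d.insert s (d.getD s 0 + 1))
        (PySem.Dict.empty : PySem.Dict (Option String) Int)).getD (some h) 0)).toNat)
      = (fun h => (pvSels data page).count (some h)) := by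
    funext h; rw [hcnt]; simp
  rw [e, ← pvFoldStep_eq_keep, ← pvAinner_eq_foldl]
  cases htgt : pvAinner page required data with
  | nil => simp
  | cons a l => simp

theorem pv_ab_eq (required : List String) (data : List (List (String × String))) (pages : List String) :
    get_required_headers_results required data pages = get_required_headers_results_alt required data pages := by
  unfold get_required_headers_results get_required_headers_results_alt
  have hfun : (fun (results : String) (page : String) =>
      let target := pvAinner page required data
      if target.isEmpty then results
      else target.foldl (fun r h =>
        (r ++ (("<li>In " ++ page) ++ ": ")) ++ (h ++ " was not applied.</li>\n")) results)
    = (fun (results : String) (page : String) =>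
      let counts : PySem.Dict (Option String) Int :=
        ((data.foldl (fun d item =>
            d.modify (pvItemGet item "html_file") [] (· ++ [pvItemGet item "selector"]))
            (PySem.Dict.empty : PySem.Dict (Option String) (List (Option String)))).getD (some page) []).foldl
          (fun d s => d.insert s (d.getD s 0 + 1)) PySem.Dict.empty
      (required.foldl (fun (st : PySem.Dict (Option String) Int × String) h =>
          if 0 < st.1.getD (some h) 0 then
            (st.1.insert (some h) (st.1.getD (some h) 0 - 1), st.2)
          else
            (st.1, st.2 ++ (((("<li>In " ++ page) ++ ": ") ++ h) ++ " was not applied.</li>\n")))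
        (counts, results)).2) := by
    funext results page
    exact (pvPage_eq required data results page).symm
  rw [hfun]
  have hlit : "Fail: not all required heading selectors are present" ++ "\n<ul>"
      = "Fail: not all required heading selectors are present\n<ul>" := rfl
  rw [hlit]

-- ===== VERDICT (by name: the statement is the Claim_ definition above) =====
theorem get_required_headers_results_spec : Claim_equal_get_required_headers_results := by
  intro required data pages _
  unfold Spec_get_required_headers_results
  exact pv_ab_eq required data pages
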